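-- pv_equiv track=rewrite | github.com/yasmingcv/python-aulas | aula07/produtoInterno.py | prodInt
-- ===== SOURCE A (Python) =====
-- def prodInt(qtd):
--     lista1 = []
--     lista2 = []
--     produto = 0
--     for i in range(qtd):
--         lista1.append(i)
--         lista2.append(i + 2)
--         produto += lista1[i] * lista2[i]
--
--     return produto
-- ===== SOURCE B (Python) =====
-- def prodInt(qtd):
--     n = qtd if qtd > 0 else 0
--     return n * (n - 1) * (2 * n + 5) // 6
-- ===== Notes on version B (the rewrite author's own statement) =====
-- stated objective: faster
-- what changed: Replaced the loop that builds two lists and accumulates i*(i+2) with the closed-form polynomial sum n(n-1)(2n+5)/6.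
import Mathlib
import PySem

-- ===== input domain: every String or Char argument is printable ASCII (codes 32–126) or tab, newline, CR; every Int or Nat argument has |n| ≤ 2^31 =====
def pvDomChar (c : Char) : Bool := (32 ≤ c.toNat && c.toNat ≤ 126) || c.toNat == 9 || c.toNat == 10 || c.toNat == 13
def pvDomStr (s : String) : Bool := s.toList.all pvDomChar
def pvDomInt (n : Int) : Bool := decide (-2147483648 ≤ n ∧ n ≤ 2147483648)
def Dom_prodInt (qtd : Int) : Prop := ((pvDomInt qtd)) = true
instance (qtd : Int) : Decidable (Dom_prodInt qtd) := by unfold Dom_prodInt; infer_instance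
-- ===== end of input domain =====

-- B replaces A's list-building loop by the closed-form sum n(n-1)(2n+5)/6 (O(1) instead of O(qtd)).

-- ===== PORT A =====
-- the loop body: append i to both lists, then add lista1[i] * lista2[i].
-- Python's list is an array with O(1) append/index, so the state is Array;
-- i comes from range(qtd), hence 0 <= i < len(l1), so l1[i.toNat]? is exactly Python's l1[i]
-- (no clamping, no wraparound, Python never raises here) and the .getD 0 default is never taken.
def prodIntStep (s : Array Int × Array Int × Int) (i : Int) : Array Int × Array Int × Int :=
  let l1 := s.1.push i
  let l2 := s.2.1.push (i + 2)
  (l1, l2, s.2.2 + (l1[i.toNat]?.getD 0) * (l2[i.toNat]?.getD 0))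

def prodInt (qtd : Int) : Int :=
  ((PySem.List.pyRange 0 qtd 1).foldl prodIntStep (#[], #[], 0)).2.2

-- ===== PORT B =====
def prodInt_alt (qtd : Int) : Int :=
  let n := if qtd > 0 then qtd else 0
  PySem.Int.floordiv (n * (n - 1) * (2 * n + 5)) 6

-- ===== PRECONDITION & SPEC =====
def Spec_prodInt (qtd : Int) (out : Int) : Prop := out = prodInt_alt qtd
instance (qtd : Int) (out : Int) : Decidable (Spec_prodInt qtd out) := by unfold Spec_prodInt; infer_instance

-- ===== CLAIM (what is proved, stated in full; the proofs are below) =====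
def Claim_equal_prodInt : Prop := ∀ (qtd : Int), Dom_prodInt qtd → Spec_prodInt qtd (prodInt qtd)

-- ===== LEMMAS AND PROOFS =====

-- loop invariant: after n iterations the state is (range n, range n + 2, Σ k*(k+2))
theorem prodInt_loop_inv (n : Nat) :
    ((List.range n).map Int.ofNat).foldl prodIntStep (#[], #[], 0) =
      (((List.range n).map Int.ofNat).toArray,
       ((List.range n).map (fun k : Nat => Int.ofNat k + 2)).toArray,
       ((List.range n).map (fun k : Nat => Int.ofNat k * (Int.ofNat k + 2))).sum) := by
  induction n with
  | zero => rfl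
  | succ n ih =>
    rw [List.range_succ]
    simp only [List.map_append, List.foldl_append, ih, List.map_cons, List.map_nil,
      List.foldl_cons, List.foldl_nil, prodIntStep, List.sum_append, List.sum_cons,
      List.sum_nil]
    have hlen1 : ((List.range n).map Int.ofNat).length = n := by simp
    have hlen2 : ((List.range n).map (fun k : Nat => Int.ofNat k + 2)).length = n := by simp
    have g1 := List.getElem?_concat_length (l := (List.range n).map Int.ofNat) (a := Int.ofNat n)
    have g2 := List.getElem?_concat_length (l := (List.range n).map (fun k : Nat => Int.ofNat k + 2)) (a := Int.ofNat n + 2)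
    rw [hlen1] at g1
    rw [hlen2] at g2
    simp only [List.push_toArray, List.getElem?_toArray, Int.ofNat_eq_natCast,
      Int.toNat_natCast] at g1 g2 ⊢
    rw [g1, g2]
    simp

-- the scaled closed form of the sum
theorem prodInt_sum_closed (n : Nat) :
    6 * ((List.range n).map (fun k : Nat => Int.ofNat k * (Int.ofNat k + 2))).sum =
      (n : Int) * ((n : Int) - 1) * (2 * (n : Int) + 5) := by
  induction n with
  | zero => rfl
  | succ n ih =>
    rw [List.range_succ]
    simp only [List.map_append, List.sum_append, List.map_cons, List.map_nil,
      List.sum_cons, List.sum_nil]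
    simp only [Int.ofNat_eq_natCast] at ih ⊢
    push_cast
    linear_combination ih

theorem prodInt_eq_sum (qtd : Int) :
    prodInt qtd = ((List.range qtd.toNat).map (fun k : Nat => Int.ofNat k * (Int.ofNat k + 2))).sum := by
  unfold prodInt
  rw [PySem.List.pyRange_one]
  simp only [Int.sub_zero]
  have : (fun k : Nat => (0 : Int) + k) = Int.ofNat := by
    funext k; simp [Int.ofNat_eq_natCast]
  rw [this, prodInt_loop_inv]

-- ===== VERDICT (by name: the statement is the Claim_ definition above) =====
theorem prodInt_spec : Claim_equal_prodInt := by
  intro qtd _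
  unfold Spec_prodInt prodInt_alt
  rw [prodInt_eq_sum]
  set S := ((List.range qtd.toNat).map (fun k : Nat => Int.ofNat k * (Int.ofNat k + 2))).sum with hS
  have h6 := prodInt_sum_closed qtd.toNat
  rw [← hS] at h6
  by_cases hq : qtd > 0
  · simp only [hq, if_pos]
    have hn : ((qtd.toNat : Int)) = qtd := Int.toNat_of_nonneg (le_of_lt hq)
    rw [hn] at h6
    rw [PySem.Int.floordiv_eq_ediv_of_pos (by norm_num), ← h6]
    omega
  · have hn : qtd.toNat = 0 := by omega
    rw [hS, hn]
    simp only [List.range_zero, List.map_nil, List.sum_nil]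
    rw [if_neg hq]
    decide
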